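-- pv_equiv track=rewrite | github.com/alexey-nevrozov/unit-test-generator | src/main.py | generate_usage_examples
-- ===== SOURCE A (Python) =====
-- def generate_usage_examples(function_name, params):
--     """
--     Generate usage examples based on parameter types.
--     For demonstration, we'll mock this.
--     """
--     examples = []
--     # Placeholder examples; replace with AI or heuristics as needed
--     from itertools import product
--     param_examples = {
--         'a': [1, -1, 0],
--         'b': [2, -2, 0],
--         # Extend as needed for other params
--     }
--     # For params not in the dict, use 0 as default
--     for combo in product(*[param_examples.get(p, [0]) for p in params]):
--         input_str = ", ".join(str(val) for val in combo)
--         examples.append(f"{function_name}({input_str}) == {sum(combo)}")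
--     return examples
-- ===== SOURCE B (Python) =====
-- def generate_usage_examples(function_name, params):
--     """Mixed-radix enumeration: count 0..total-1 and decode each index with divmod
--     into one value combination (last parameter = least significant digit)."""
--     param_examples = {
--         'a': [1, -1, 0],
--         'b': [2, -2, 0],
--     }
--     value_lists = [param_examples.get(p, [0]) for p in params]
--     total = 1
--     for vs in value_lists:
--         total *= len(vs)
--     examples = []
--     for i in range(total):
--         rem = i
--         parts = []
--         combo_sum = 0
--         for vs in reversed(value_lists):
--             rem, d = divmod(rem, len(vs))
--             v = vs[d]
--             parts.append(str(v))
--             combo_sum += v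
--         parts.reverse()
--         examples.append(f"{function_name}({', '.join(parts)}) == {combo_sum}")
--     return examples
-- ===== Notes on version B (the rewrite author's own statement) =====
-- stated objective: alternative
-- what changed: Replaces itertools.product's recursive tuple enumeration by mixed-radix index decoding: compute total = product of the per-parameter list lengths, count i from 0 to total-1, and decode each index with divmod into its value combination (last parameter = least significant digit), formatting as it decodes.
import Mathlib
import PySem

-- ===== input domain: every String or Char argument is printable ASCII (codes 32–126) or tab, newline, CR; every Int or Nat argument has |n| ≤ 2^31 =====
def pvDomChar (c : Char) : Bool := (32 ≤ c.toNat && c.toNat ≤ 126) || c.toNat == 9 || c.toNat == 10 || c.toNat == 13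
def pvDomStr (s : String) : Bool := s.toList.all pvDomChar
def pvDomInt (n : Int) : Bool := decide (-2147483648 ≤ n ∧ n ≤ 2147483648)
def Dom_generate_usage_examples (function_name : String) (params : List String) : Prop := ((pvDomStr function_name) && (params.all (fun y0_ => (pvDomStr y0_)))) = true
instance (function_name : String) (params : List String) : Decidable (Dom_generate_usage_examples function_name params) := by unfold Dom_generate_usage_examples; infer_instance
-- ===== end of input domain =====

-- B replaces the recursive itertools.product enumeration by mixed-radix index
-- decoding: count 0..total-1 and decode each index with divmod (objective: alternative).

-- ===== PORT A =====
-- the param_examples dict (shared constant data of both Pythons)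
def pvParamExamples : PySem.Dict String (List Int) :=
  PySem.Dict.ofList [("a", [1, -1, 0]), ("b", [2, -2, 0])]

-- itertools.product over a list of value lists (earlier lists outer, last varies fastest)
def pvProduct : List (List Int) → List (List Int)
  | [] => [[]]
  | xs :: rest => xs.flatMap (fun v => (pvProduct rest).map (fun c => v :: c))

def generate_usage_examples (function_name : String) (params : List String) : List String :=
  (pvProduct (params.map (fun p => pvParamExamples.getD p [0]))).foldl
    (fun examples combo =>
      examples ++ [function_name ++ "(" ++
        PySem.Str.join ", " (combo.map (fun val => PySem.Int.toStr val)) ++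
        ") == " ++ PySem.Int.toStr (combo.foldl (· + ·) 0)]) []

-- ===== PORT B =====
-- one step of the inner 'for vs in reversed(value_lists): rem, d = divmod(rem, len(vs))'
-- loop over the state (rem, parts, combo_sum); len(vs) ≥ 1 always (every value list is
-- [1,-1,0], [2,-2,0] or [0]) so divmod never raises, and d = rem % len(vs) ∈ [0, len(vs))
-- so vs[d] → pyGet? is always some and the '.getD 0' branch never fires
def pvDecodeStep (st : Int × List String × Int) (vs : List Int) : Int × List String × Int :=
  let q := PySem.Int.floordiv st.1 (vs.length : Int)
  let d := PySem.Int.mod st.1 (vs.length : Int)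
  let v := (PySem.List.pyGet? vs d).getD 0
  (q, st.2.1 ++ [PySem.Int.toStr v], st.2.2 + v)

def generate_usage_examples_alt (function_name : String) (params : List String) : List String :=
  let valueLists := params.map (fun p => pvParamExamples.getD p [0])
  let total := valueLists.foldl (fun t vs => t * (vs.length : Int)) 1
  (PySem.List.pyRange 0 total 1).foldl
    (fun examples i =>
      let st := valueLists.reverse.foldl pvDecodeStep (i, ([] : List String), (0 : Int))
      let parts := st.2.1.reverse
      examples ++ [function_name ++ "(" ++ PySem.Str.join ", " parts ++
        ") == " ++ PySem.Int.toStr st.2.2]) []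

-- ===== PRECONDITION & SPEC =====
def Spec_generate_usage_examples (function_name : String) (params : List String) (out : List String) : Prop := out = generate_usage_examples_alt function_name params
instance (function_name : String) (params : List String) (out : List String) : Decidable (Spec_generate_usage_examples function_name params out) := by unfold Spec_generate_usage_examples; infer_instance

-- ===== CLAIM (what is proved, stated in full; the proofs are below) =====
def Claim_equal_generate_usage_examples : Prop := ∀ (function_name : String) (params : List String), Dom_generate_usage_examples function_name params → Spec_generate_usage_examples function_name params (generate_usage_examples function_name params)

-- ===== LEMMAS AND PROOFS =====

-- product of the radices (number of combinations)
def pvN (ls : List (List Int)) : Nat := (ls.map List.length).prod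

-- reference decoding of index j into one combination (most significant digit first)
def pvDigits : List (List Int) → Nat → List Int
  | [], _ => []
  | xs :: rest, j => xs.getD (j / pvN rest) 0 :: pvDigits rest (j % pvN rest)

theorem pvN_pos {ls : List (List Int)} (h : ∀ vs ∈ ls, vs ≠ []) : 0 < pvN ls := by
  induction ls with
  | nil => simp [pvN]
  | cons xs rest ih =>
    have hx : xs ≠ [] := h xs (by simp)
    have : 0 < pvN rest := ih (fun vs hvs => h vs (by simp [hvs]))
    simp only [pvN, List.map_cons, List.prod_cons]
    exact Nat.mul_pos (List.length_pos_iff.mpr hx) this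

theorem pvValueList_ne_nil (p : String) : pvParamExamples.getD p [0] ≠ [] := by
  have hpe : pvParamExamples = PySem.Dict.mk [("a", [1, -1, 0]), ("b", [2, -2, 0])] := by decide
  rw [hpe]
  simp only [PySem.Dict.getD]
  rw [PySem.Dict.get?_mk_cons, PySem.Dict.get?_mk_cons]
  split_ifs <;> simp [PySem.Dict.get?]

-- (range xs.length).map getD reproduces xs itself
theorem pvMap_getD_range (xs : List Int) :
    (List.range xs.length).map (fun a => xs.getD a 0) = xs := by
  apply List.ext_getElem
  · simp
  · intro i h1 h2
    simp [List.getD, List.getElem?_eq_getElem h2]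

-- the inner divmod fold, from any state, shifts out the pvN ls low-order digits of rem
theorem pvDecode_fold (ls : List (List Int)) (h : ∀ vs ∈ ls, vs ≠ [])
    (j : Nat) (p : List String) (s : Int) :
    ls.reverse.foldl pvDecodeStep ((j : Int), p, s)
      = (((j / pvN ls : Nat) : Int),
         p ++ ((pvDigits ls (j % pvN ls)).map PySem.Int.toStr).reverse,
         s + (pvDigits ls (j % pvN ls)).sum) := by
  induction ls generalizing j p s with
  | nil => simp [pvN, pvDigits]
  | cons xs rest ih =>
    have hx : xs ≠ [] := h xs (by simp)
    have hL : 0 < xs.length := List.length_pos_iff.mpr hx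
    have hM : 0 < pvN rest := pvN_pos (fun vs hvs => h vs (by simp [hvs]))
    rw [List.reverse_cons, List.foldl_append,
      ih (fun vs hvs => h vs (by simp [hvs])) j p s]
    simp only [List.foldl_cons, List.foldl_nil, pvDecodeStep]
    have hd : (j / pvN rest) % xs.length < xs.length := Nat.mod_lt _ hL
    have hNcons : pvN (xs :: rest) = xs.length * pvN rest := by
      simp [pvN, List.map_cons, List.prod_cons]
    have hdiv : j / pvN rest / xs.length = j / pvN (xs :: rest) := by
      rw [Nat.div_div_eq_div_mul, hNcons, Nat.mul_comm]
    have hdig : (j % pvN (xs :: rest)) / pvN rest = (j / pvN rest) % xs.length := by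
      rw [hNcons, Nat.mul_comm, Nat.mod_mul_right_div_self]
    have hmod : (j % pvN (xs :: rest)) % pvN rest = j % pvN rest := by
      rw [hNcons, Nat.mul_comm, Nat.mod_mul_right_mod]
    simp only [PySem.Int.floordiv_natCast, PySem.Int.mod_natCast, PySem.List.pyGet?_natCast,
      hdiv, pvDigits, hdig, hmod, List.getElem?_eq_getElem hd, Option.getD_some,
      Prod.mk.injEq]
    refine ⟨trivial, ?_, ?_⟩
    · simp [List.getD, List.getElem?_eq_getElem hd, List.append_assoc]
    · simp [List.sum_cons, List.getD, List.getElem?_eq_getElem hd]; ring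

-- the indices 0..pvN ls - 1 decode exactly to itertools.product, in order
theorem pvRange_digits (ls : List (List Int)) (h : ∀ vs ∈ ls, vs ≠ []) :
    (List.range (pvN ls)).map (pvDigits ls) = pvProduct ls := by
  induction ls with
  | nil => simp [pvN, pvProduct, pvDigits]
  | cons xs rest ih =>
    have hM : 0 < pvN rest := pvN_pos (fun vs hvs => h vs (by simp [hvs]))
    have hNcons : pvN (xs :: rest) = xs.length * pvN rest := by
      simp [pvN, List.map_cons, List.prod_cons]
    have hrange : ∀ L : Nat, List.range (L * pvN rest)
        = (List.range L).flatMap (fun a => (List.range (pvN rest)).map (fun b => a * pvN rest + b)) := by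
      intro L
      induction L with
      | zero => simp
      | succ L ihL =>
        rw [Nat.succ_mul, List.range_add, ihL, List.range_succ, List.flatMap_append]
        simp [List.flatMap]
    have hstep : ∀ a, a < xs.length →
        ((List.range (pvN rest)).map (fun b => a * pvN rest + b)).map (pvDigits (xs :: rest))
          = (pvProduct rest).map (fun c => xs.getD a 0 :: c) := by
      intro a _
      rw [← ih (fun vs hvs => h vs (by simp [hvs]))]
      simp only [List.map_map]
      apply List.map_congr_left
      intro b hb
      have hbM : b < pvN rest := List.mem_range.mp hb
      simp only [Function.comp, pvDigits]
      rw [Nat.add_comm (a * pvN rest) b, Nat.add_mul_div_right _ _ hM, Nat.div_eq_of_lt hbM,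
        Nat.zero_add, Nat.add_mul_mod_self_right, Nat.mod_eq_of_lt hbM]
    rw [hNcons, hrange, List.map_flatMap]
    have hmain : (List.range xs.length).map
        (fun a => ((List.range (pvN rest)).map (fun b => a * pvN rest + b)).map (pvDigits (xs :: rest)))
        = xs.map (fun v => (pvProduct rest).map (fun c => v :: c)) := by
      conv_rhs => rw [← pvMap_getD_range xs]
      rw [List.map_map]
      apply List.map_congr_left
      intro a ha
      exact hstep a (List.mem_range.mp ha)
    rw [List.flatMap_def, hmain,
      show pvProduct (xs :: rest) = xs.flatMap (fun v => (pvProduct rest).map (fun c => v :: c)) from rfl,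
      List.flatMap_def]

-- the running-product loop computes pvN
theorem pvFoldl_total (ls : List (List Int)) (a : Int) :
    ls.foldl (fun t vs => t * (vs.length : Int)) a = a * (pvN ls : Int) := by
  induction ls generalizing a with
  | nil => simp [pvN]
  | cons xs rest ih =>
    rw [List.foldl_cons, ih]
    simp only [pvN, List.map_cons, List.prod_cons]
    push_cast
    ring

theorem generate_usage_examples_eq_alt (function_name : String) (params : List String) :
    generate_usage_examples function_name params
      = generate_usage_examples_alt function_name params := by
  simp only [generate_usage_examples, generate_usage_examples_alt]
  have hne : ∀ vs ∈ params.map (fun p => pvParamExamples.getD p [0]), vs ≠ [] := by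
    intro vs hvs
    obtain ⟨p, _, rfl⟩ := List.mem_map.mp hvs
    exact pvValueList_ne_nil p
  generalize hls : params.map (fun p => pvParamExamples.getD p [0]) = ls at hne ⊢
  rw [pvFoldl_total ls 1, one_mul, PySem.List.pyRange_one]
  simp only [Int.sub_zero, Int.toNat_natCast, zero_add]
  rw [PySem.List.foldl_append_singleton_eq_map, PySem.List.foldl_append_singleton_eq_map,
    List.map_map, ← pvRange_digits ls hne, List.map_map]
  apply List.map_congr_left
  intro k hk
  have hkN : k < pvN ls := List.mem_range.mp hk
  simp only [Function.comp]
  rw [pvDecode_fold ls hne k [] 0, Nat.mod_eq_of_lt hkN]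
  simp [List.sum_eq_foldl]

-- ===== VERDICT (by name: the statement is the Claim_ definition above) =====
theorem generate_usage_examples_spec : Claim_equal_generate_usage_examples := by
  intro fn params _
  exact generate_usage_examples_eq_alt fn params
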